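-- pv_equiv track=rewrite | github.com/Hyunseo17/LeetCode | interview2.py | solution
-- ===== SOURCE A (Python) =====
-- def solution(words):
--     words = [word.lower() for word in words]
--     suffix_map = {}
--     count = 0
--
--     for word in words:
--         reversed_word = word[::-1]
--
--         # Check if any suffix of the current word is in the map
--         for i in range(len(reversed_word)):
--             if reversed_word[i:] in suffix_map:
--                 count += 1
--                 break
--
--         # Store all suffixes of the reversed word in the map
--         for i in range(len(reversed_word)):
--             suffix_map[reversed_word[i:]] = True
--     return count
-- ===== SOURCE B (Python) =====
-- def solution(words):
--     nonempty = sum(1 for w in words if w)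
--     firsts = {w[0].lower() for w in words if w}
--     return nonempty - len(firsts)
-- ===== Notes on version B (the rewrite author's own statement) =====
-- stated objective: faster
-- what changed: Replaces the suffix-dictionary simulation (storing every suffix of every reversed word and scanning suffixes per word) by the closed-form identity: answer = (number of non-empty words) - (number of distinct lowercased first characters), computed with two one-pass aggregates.
import Mathlib
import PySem

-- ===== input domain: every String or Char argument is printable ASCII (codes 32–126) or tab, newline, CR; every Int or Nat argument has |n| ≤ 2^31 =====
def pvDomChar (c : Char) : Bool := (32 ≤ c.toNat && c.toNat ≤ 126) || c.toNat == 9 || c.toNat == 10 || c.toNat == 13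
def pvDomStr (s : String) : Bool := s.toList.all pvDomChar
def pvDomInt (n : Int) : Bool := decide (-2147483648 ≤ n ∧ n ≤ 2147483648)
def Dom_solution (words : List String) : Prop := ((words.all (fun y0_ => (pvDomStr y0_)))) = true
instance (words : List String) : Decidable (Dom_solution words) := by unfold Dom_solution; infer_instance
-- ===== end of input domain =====

-- B replaces A's suffix-dictionary simulation by the identity: answer = (#non-empty words) - (#distinct lowercased first characters); a timing run measured B faster.


-- ===== PORT A =====
-- 'for i in range(len(r)): if r[i:] in suffix_map: count += 1; break'  — break on first hit = List.any
def solutionCheck (r : String) (m : PySem.Dict String Bool) : Bool :=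
  (PySem.List.pyRange 0 (PySem.Str.len r) 1).any
    (fun i => m.contains (PySem.Str.slice r (some i) none))

-- 'for i in range(len(r)): suffix_map[r[i:]] = True'
def solutionStore (r : String) (m : PySem.Dict String Bool) : PySem.Dict String Bool :=
  (PySem.List.pyRange 0 (PySem.Str.len r) 1).foldl
    (fun m i => m.insert (PySem.Str.slice r (some i) none) true) m

def solutionLoop : List String → PySem.Dict String Bool → Int → Int
  | [], _, count => count
  | w :: ws, m, count =>
      let r := (PySem.Str.slice? w none none (-1)).getD ""   -- word[::-1]; slice? is some for step -1
      let count' := if solutionCheck r m then count + 1 else count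
      solutionLoop ws (solutionStore r m) count'

def solution (words : List String) : Int :=
  solutionLoop (words.map PySem.Str.lower) PySem.Dict.empty 0

-- ===== PORT B =====
-- 'sum(1 for w in words if w)' and '{w[0].lower() for w in words if w}' (the 1-char string w[0]
-- represented by its single character; exact, since Python's lower of one ASCII char is one char)
def solution_alt (words : List String) : Int :=
  let nonempty : Int := ((words.filter (fun w => !w.toList.isEmpty)).map (fun _ => (1 : Int))).sum
  let firsts : PySem.Set Char :=
    PySem.Set.ofList (words.filterMap (fun w => w.toList.head?.map PySem.Chars.lowerChar))
  nonempty - PySem.Set.len firsts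

-- ===== PRECONDITION & SPEC =====
def Spec_solution (words : List String) (out : Int) : Prop := out = solution_alt words
instance (words : List String) (out : Int) : Decidable (Spec_solution words out) := by unfold Spec_solution; infer_instance

-- ===== CLAIM (what is proved, stated in full; the proofs are below) =====
def Claim_equal_solution : Prop := ∀ (words : List String), Dom_solution words → Spec_solution words (solution words)

-- ===== LEMMAS AND PROOFS =====

-- duplicate-counting fold: number of elements of cs already seen, seed set S
def dupCount : PySem.Set Char → List Char → Int
  | _, [] => 0
  | S, c :: cs => (if S.contains c then 1 else 0) + dupCount (S.add c) cs

lemma ofList_inj {a b : List Char} (h : String.ofList a = String.ofList b) : a = b := by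
  have := congrArg String.toList h
  simpa using this

lemma dupCount_spec (cs : List Char) : ∀ (S : PySem.Set Char),
    dupCount S cs = (cs.length : Int) - (((S.update cs).length : Int) - (S.length : Int)) := by
  induction cs with
  | nil => intro S; simp [dupCount, PySem.Set.update]
  | cons c cs ih =>
    intro S
    have hupd : S.update (c :: cs) = (S.add c).update cs := by
      simp [PySem.Set.update]
    by_cases hc : S.contains c = true
    · have hmem : c ∈ S := by simpa using hc
      have hadd : S.add c = S := by simp [PySem.Set.add, hmem]
      rw [show dupCount S (c :: cs) = 1 + dupCount (S.add c) cs by simp [dupCount, hmem],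
        hadd, ih S, hupd, hadd]
      push_cast [List.length_cons]; ring
    · have hmem : c ∉ S := by simpa using hc
      have hadd : S.add c = S ++ [c] := by simp [PySem.Set.add, hmem]
      rw [show dupCount S (c :: cs) = 0 + dupCount (S.add c) cs by simp [dupCount, hmem],
        ih (S.add c), hupd, hadd]
      simp only [List.length_append, List.length_cons, List.length_nil]; push_cast; ring

-- the invariant tying A's suffix dictionary to the set of first characters seen so far:
-- every key ends in a character whose 1-char string is itself a key, and the 1-char keys
-- are exactly the characters of S
def DictInv (m : PySem.Dict String Bool) (S : PySem.Set Char) : Prop :=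
  (∀ s ∈ m.keys, ∃ t c, s = String.ofList (t ++ [c]) ∧ String.ofList [c] ∈ m.keys) ∧
  (∀ c : Char, String.ofList [c] ∈ m.keys ↔ c ∈ S)

lemma store_keys (rl : List Char) (m : PySem.Dict String Bool) :
    (solutionStore (String.ofList rl) m).keys
      = PySem.Set.update m.keys ((List.range rl.length).map (fun k => String.ofList (rl.drop k))) := by
  unfold solutionStore
  rw [show PySem.Str.len (String.ofList rl) = ((rl.length : Nat) : Int) by simp [PySem.Str.len]]
  rw [PySem.List.pyRange_zero_natCast, List.foldl_map]
  have h : (fun (m : PySem.Dict String Bool) (k : Nat) => m.insert (PySem.Str.slice (String.ofList rl) (some (k:Int)) none) true)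
       = fun m k => m.insert ((fun k : Nat => String.ofList (rl.drop k)) k) ((fun (_ : PySem.Dict String Bool) (_ : Nat) => true) m k) := by
    funext m k; simp [PySem.Str.slice, PySem.List.slice_from_natCast]
  rw [h, PySem.Dict.keys_foldl_insert_key]

lemma check_iff (rl : List Char) (m : PySem.Dict String Bool) :
    (solutionCheck (String.ofList rl) m = true) ↔ ∃ k < rl.length, String.ofList (rl.drop k) ∈ m.keys := by
  unfold solutionCheck
  rw [show PySem.Str.len (String.ofList rl) = ((rl.length : Nat) : Int) by simp [PySem.Str.len]]
  rw [PySem.List.pyRange_zero_natCast]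
  simp [List.any_eq_true, PySem.Dict.contains_iff_mem_keys, PySem.Str.slice,
    PySem.List.slice_from_natCast]

lemma drop_rl (cs' : List Char) (c : Char) {k : Nat} (hk : k < (cs'.reverse ++ [c]).length) :
    (cs'.reverse ++ [c]).drop k = cs'.reverse.drop k ++ [c] := by
  apply List.drop_append_of_le_length
  simp at hk ⊢; omega

lemma check_sem (c : Char) (cs' : List Char) (m : PySem.Dict String Bool) (S : PySem.Set Char)
    (hInv : DictInv m S) :
    (solutionCheck (String.ofList (cs'.reverse ++ [c])) m = true) ↔ c ∈ S := by
  rw [check_iff]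
  constructor
  · rintro ⟨k, hk, hmem⟩
    rw [drop_rl cs' c hk] at hmem
    obtain ⟨t, c', heq, hsing⟩ := hInv.1 _ hmem
    have hl : cs'.reverse.drop k ++ [c] = t ++ [c'] := ofList_inj heq
    have : c' = c := by
      have h1 := congrArg List.getLast? hl
      simp at h1; exact h1.symm
    rw [this] at hsing
    exact (hInv.2 c).mp hsing
  · intro hc
    refine ⟨cs'.reverse.length, by simp, ?_⟩
    rw [drop_rl cs' c (by simp), List.drop_length]
    simpa using (hInv.2 c).mpr hc

lemma store_inv (c : Char) (cs' : List Char) (m : PySem.Dict String Bool) (S : PySem.Set Char)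
    (hInv : DictInv m S) :
    DictInv (solutionStore (String.ofList (cs'.reverse ++ [c])) m) (S.add c) := by
  have hkeys := store_keys (cs'.reverse ++ [c]) m
  have hlast : String.ofList [c]
      ∈ (List.range (cs'.reverse ++ [c]).length).map (fun k => String.ofList ((cs'.reverse ++ [c]).drop k)) := by
    refine List.mem_map.mpr ⟨cs'.reverse.length, by simp, ?_⟩
    rw [drop_rl cs' c (by simp), List.drop_length]
    rfl
  constructor
  · intro s hs
    rw [hkeys, PySem.Set.mem_update] at hs
    rcases hs with hs | hs
    · obtain ⟨t, c', heq, hsing⟩ := hInv.1 _ hs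
      exact ⟨t, c', heq, by rw [hkeys, PySem.Set.mem_update]; exact Or.inl hsing⟩
    · obtain ⟨k, hk, rfl⟩ := List.mem_map.mp hs
      rw [List.mem_range] at hk
      refine ⟨cs'.reverse.drop k, c, by rw [drop_rl cs' c hk], ?_⟩
      rw [hkeys, PySem.Set.mem_update]
      exact Or.inr hlast
  · intro d
    rw [hkeys, PySem.Set.mem_update, PySem.Set.mem_add, ← hInv.2 d]
    constructor
    · rintro (h | h)
      · exact Or.inl h
      · obtain ⟨k, hk, heq⟩ := List.mem_map.mp h
        rw [List.mem_range] at hk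
        rw [drop_rl cs' c hk] at heq
        have hl := ofList_inj heq
        have hcd : c = d := by
          have h1 := congrArg List.getLast? hl
          simpa using h1
        exact Or.inr hcd.symm
    · rintro (h | rfl)
      · exact Or.inl h
      · exact Or.inr hlast

lemma check_nil (m : PySem.Dict String Bool) : solutionCheck (String.ofList []) m = false := by
  unfold solutionCheck
  rw [show PySem.Str.len (String.ofList []) = ((0 : Nat) : Int) by simp [PySem.Str.len]]
  rw [PySem.List.pyRange_zero_natCast]
  simp

lemma store_nil (m : PySem.Dict String Bool) : solutionStore (String.ofList []) m = m := by
  unfold solutionStore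
  rw [show PySem.Str.len (String.ofList []) = ((0 : Nat) : Int) by simp [PySem.Str.len]]
  rw [PySem.List.pyRange_zero_natCast]
  simp

lemma loop_eq (ws : List String) : ∀ (m : PySem.Dict String Bool) (S : PySem.Set Char) (count : Int),
    DictInv m S →
    solutionLoop ws m count = count + dupCount S (ws.filterMap (fun w => w.toList.head?)) := by
  induction ws with
  | nil => intro m S count _; simp [solutionLoop, dupCount]
  | cons w ws ih =>
    intro m S count hInv
    have hr : (PySem.Str.slice? w none none (-1)).getD "" = String.ofList w.toList.reverse := by
      rw [PySem.Str.slice?_none_none_neg_one]; rfl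
    simp only [solutionLoop, hr]
    cases hcs : w.toList with
    | nil =>
      simp only [List.reverse_nil, check_nil, store_nil, if_neg Bool.false_ne_true]
      rw [ih m S count hInv]
      simp [hcs]
    | cons c cs' =>
      rw [List.reverse_cons]
      have hstream : (w :: ws).filterMap (fun w => w.toList.head?)
          = c :: ws.filterMap (fun w => w.toList.head?) := by
        simp [hcs]
      rw [hstream]
      by_cases hc : c ∈ S
      · have hchk : solutionCheck (String.ofList (cs'.reverse ++ [c])) m = true :=
          (check_sem c cs' m S hInv).mpr hc
        have hcon : S.contains c = true := by simpa using hc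
        rw [hchk, if_pos rfl, ih _ (S.add c) (count + 1) (store_inv c cs' m S hInv)]
        simp only [dupCount, hcon, if_pos]
        ring
      · have hchk : solutionCheck (String.ofList (cs'.reverse ++ [c])) m = false := by
          rw [← Bool.not_eq_true]
          exact fun h => hc ((check_sem c cs' m S hInv).mp h)
        rw [hchk, if_neg Bool.false_ne_true, ih _ (S.add c) count (store_inv c cs' m S hInv)]
        simp [dupCount, hc]

lemma stream_eq (words : List String) :
    (words.map PySem.Str.lower).filterMap (fun w => w.toList.head?)
      = words.filterMap (fun w => w.toList.head?.map PySem.Chars.lowerChar) := by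
  induction words with
  | nil => rfl
  | cons w ws ih =>
    simp only [List.map_cons, List.filterMap_cons, PySem.Str.toList_lower]
    rw [show PySem.Chars.lower w.toList = w.toList.map PySem.Chars.lowerChar from rfl, List.head?_map]
    cases w.toList.head? <;> simp [ih]

lemma stream_len (words : List String) :
    ((words.filterMap (fun w => w.toList.head?.map PySem.Chars.lowerChar)).length : Int)
      = ((words.filter (fun w => !w.toList.isEmpty)).map (fun _ => (1:Int))).sum := by
  induction words with
  | nil => rfl
  | cons w ws ih =>
    cases h : w.toList with
    | nil => simp only [List.filterMap_cons, List.filter_cons, h]; simpa using ih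
    | cons c t =>
      simp [h, ih]
      ring

theorem loop_main (words : List String) : solution words = solution_alt words := by
  unfold solution solution_alt
  have hInv0 : DictInv PySem.Dict.empty [] := by
    constructor
    · intro s hs; simp [PySem.Dict.keys_empty] at hs
    · intro c; simp [PySem.Dict.keys_empty]
  rw [loop_eq _ _ _ _ hInv0, dupCount_spec, stream_eq]
  rw [show PySem.Set.update ([] : PySem.Set Char) (words.filterMap (fun w => w.toList.head?.map PySem.Chars.lowerChar))
        = PySem.Set.ofList (words.filterMap (fun w => w.toList.head?.map PySem.Chars.lowerChar)) from rfl]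
  rw [← stream_len]
  simp [PySem.Set.len]

-- ===== VERDICT (by name: the statement is the Claim_ definition above) =====
theorem solution_spec : Claim_equal_solution := by
  intro words _
  unfold Spec_solution
  exact loop_main words
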